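-- pv_equiv track=rewrite | github.com/aarneranta/python-course-gbg | summer-2022/QAs_Aarne/ex4.py | wc2
-- ===== SOURCE A (Python) =====
-- def wc2(s):
--     ls, ws, cs = 0, 0, 0
--     inword = False
--     for c in s:
--         cs += 1
--         if c.isspace():
--             inword = False
--             if c == '\n':
--                 ls += 1
--         else:
--             if not inword:
--                 ws += 1
--             inword = True
--     return ls, ws, cs
-- ===== SOURCE B (Python) =====
-- def wc2(s):
--     # Idiomatic: three independent library computations instead of a manual
--     # per-character state machine; str.split() matches A's inword logic.
--     return s.count('\n'), len(s.split()), len(s)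
-- ===== Notes on version B (the rewrite author's own statement) =====
-- stated objective: idiomatic
-- what changed: Replaces the manual per-character loop with an explicit inword flag by three independent library computations: counting newlines, the length of the whitespace split, and the string length.
import Mathlib
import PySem

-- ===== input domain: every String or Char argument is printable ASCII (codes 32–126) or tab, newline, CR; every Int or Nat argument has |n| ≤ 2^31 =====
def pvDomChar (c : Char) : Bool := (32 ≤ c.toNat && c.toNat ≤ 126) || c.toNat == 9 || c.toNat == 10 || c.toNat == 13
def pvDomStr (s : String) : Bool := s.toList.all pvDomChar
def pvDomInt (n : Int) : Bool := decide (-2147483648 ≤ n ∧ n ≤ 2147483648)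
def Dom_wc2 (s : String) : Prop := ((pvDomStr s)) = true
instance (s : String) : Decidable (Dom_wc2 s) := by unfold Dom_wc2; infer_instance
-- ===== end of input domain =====

-- B replaces A's manual per-character state machine by three independent
-- library computations (newline count, whitespace split length, length): idiomatic,
-- and measurably faster by a constant factor (C-level built-ins vs a Python loop).


-- ===== PORT A =====
-- one loop iteration of A: cs += 1, then the isspace branch updating (ls, ws, inword)
def wc2Step (st : Int × Int × Int × Bool) (c : Char) : Int × Int × Int × Bool :=
  let ls := st.1
  let ws := st.2.1
  let cs := st.2.2.1 + 1
  let inword := st.2.2.2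
  if PySem.Chars.isspace c then
    if c == '\n' then (ls + 1, ws, cs, false) else (ls, ws, cs, false)
  else
    if inword then (ls, ws, cs, true) else (ls, ws + 1, cs, true)

def wc2 (s : String) : Int × Int × Int :=
  let r := s.toList.foldl wc2Step (0, 0, 0, false)
  (r.1, r.2.1, r.2.2.1)

-- ===== PORT B =====
def wc2_alt (s : String) : Int × Int × Int :=
  ((PySem.Str.count s "\n" : Int), PySem.List.len (PySem.Str.split₀ s), PySem.Str.len s)

-- ===== PRECONDITION & SPEC =====
def Spec_wc2 (s : String) (out : Int × Int × Int) : Prop := out = wc2_alt s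
instance (s : String) (out : Int × Int × Int) : Decidable (Spec_wc2 s out) := by unfold Spec_wc2; infer_instance

-- ===== CLAIM (what is proved, stated in full; the proofs are below) =====
def Claim_equal_wc2 : Prop := ∀ (s : String), Dom_wc2 s → Spec_wc2 s (wc2 s)

-- ===== LEMMAS AND PROOFS =====

-- number of word starts in cs when currently inside a word iff inw
def wordsFrom : List Char → Bool → Nat
  | [], _ => 0
  | c :: r, inw =>
      if PySem.Chars.isspace c then wordsFrom r false
      else (if inw then 0 else 1) + wordsFrom r true

-- whether we end inside a word
def endInword : List Char → Bool → Bool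
  | [], inw => inw
  | c :: r, _ => endInword r (!PySem.Chars.isspace c)

theorem foldl_wc2Step (cs : List Char) : ∀ (ls ws cnt : Int) (inw : Bool),
    cs.foldl wc2Step (ls, ws, cnt, inw) =
      (ls + (cs.count '\n' : Int), ws + (wordsFrom cs inw : Int),
       cnt + (cs.length : Int), endInword cs inw) := by
  induction cs with
  | nil => intro ls ws cnt inw; simp [wordsFrom, endInword]
  | cons c r ih =>
    intro ls ws cnt inw
    simp only [List.foldl_cons, wc2Step, wordsFrom, endInword, List.count_cons,
      List.length_cons]
    by_cases hs : PySem.Chars.isspace c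
    · have hns : (c == '\n') = true → PySem.Chars.isspace c = true := fun _ => hs
      by_cases hn : c = '\n'
      · subst hn
        simp [hs, ih]
        omega
      · have : (c == '\n') = false := by simp [hn]
        simp [hs, this, ih]
        omega
    · have hn : c ≠ '\n' := by
        intro h; subst h; exact hs (by decide)
      have hb : (c == '\n') = false := by simp [hn]
      cases inw <;>
        · simp [hs, hb, ih]
          omega

-- counting a single character with Chars.count's fueled scanner
theorem count_go_singleton (c : Char) (l : List Char) : ∀ (acc : Nat),
    PySem.Chars.count.go [c] l.length l acc = acc + l.count c := by
  induction l with
  | nil => intro acc; simp [PySem.Chars.count.go]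
  | cons h t ih =>
    intro acc
    simp only [List.length_cons, List.count_cons]
    by_cases hc : h = c
    · subst hc
      have hp : [h].isPrefixOf (h :: t) = true := by simp [List.isPrefixOf]
      simp [PySem.Chars.count.go, hp, ih]
      omega
    · have hp : [c].isPrefixOf (h :: t) = false := by
        simp [List.isPrefixOf]; exact fun h' => absurd h'.symm hc
      simp [PySem.Chars.count.go, hp, ih, hc]
      try omega

theorem count_singleton (c : Char) (l : List Char) :
    PySem.Chars.count l [c] = l.count c := by
  simpa using count_go_singleton c l 0

-- split₀.go's result length counted by wordsFrom
theorem split₀_go_length (cs : List Char) : ∀ (cur : List Char) (acc : List (List Char)),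
    (PySem.Chars.split₀.go cs cur acc).length =
      acc.length + (if cur.isEmpty then 0 else 1) + wordsFrom cs (!cur.isEmpty) := by
  induction cs with
  | nil =>
    intro cur acc
    by_cases h : cur.isEmpty <;> simp [PySem.Chars.split₀.go, h, wordsFrom]
  | cons c r ih =>
    intro cur acc
    by_cases hs : PySem.Chars.isspace c
    · by_cases h : cur.isEmpty
      · simp [PySem.Chars.split₀.go, hs, h, wordsFrom, ih]
      · simp [PySem.Chars.split₀.go, hs, h, wordsFrom, ih]
        try omega
    · have hne : ((c :: cur).isEmpty) = false := rfl
      by_cases h : cur.isEmpty <;>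
        · simp [PySem.Chars.split₀.go, hs, h, wordsFrom, ih, hne]
          try omega

theorem split₀_length (cs : List Char) :
    (PySem.Chars.split₀ cs).length = wordsFrom cs false := by
  simpa [PySem.Chars.split₀] using split₀_go_length cs [] []

-- ===== VERDICT (by name: the statement is the Claim_ definition above) =====
theorem wc2_spec : Claim_equal_wc2 := by
  intro s _
  unfold Spec_wc2 wc2 wc2_alt
  rw [foldl_wc2Step]
  simp [PySem.Str.count, PySem.Str.split₀, PySem.Str.len,
    count_singleton, split₀_length]
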